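-- pv_equiv track=rewrite | github.com/DizzyYunxuan/Leetcode_answers | football.py | check
-- ===== SOURCE A (Python) =====
-- def check(balls, intervals):
--     res = 0
--     for ball in balls:
--         for inter in intervals:
--             if ball >= inter[0]:
--                 if ball <= inter[1]:
--                     res += 1
--     return res
-- ===== SOURCE B (Python) =====
-- def check(balls, intervals):
--     # valid (non-empty) intervals only; an inverted interval can never contain a ball
--     pairs = [(it[0], it[1]) for it in intervals if it[0] <= it[1]]
--     starts = sorted(s for s, _ in pairs)
--     ends = sorted(e for _, e in pairs)
--     res = 0
--     i = j = 0
--     for b in sorted(balls):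
--         while i < len(starts) and starts[i] <= b:
--             i += 1
--         while j < len(ends) and ends[j] < b:
--             j += 1
--         res += i - j
--     return res
-- ===== Notes on version B (the rewrite author's own statement) =====
-- stated objective: faster
-- what changed: B replaces A's B*I double loop by sorting the interval starts, ends and the balls once and sweeping the sorted balls with two monotone pointers, counting per ball (#starts <= ball) - (#ends < ball) over the valid (start <= end) intervals.
-- outside the precondition, e.g. on check([], [[5]]): A returns 0, B raises IndexError; on check([0], [[5]]): A returns 0, B raises IndexError
import Mathlib
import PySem

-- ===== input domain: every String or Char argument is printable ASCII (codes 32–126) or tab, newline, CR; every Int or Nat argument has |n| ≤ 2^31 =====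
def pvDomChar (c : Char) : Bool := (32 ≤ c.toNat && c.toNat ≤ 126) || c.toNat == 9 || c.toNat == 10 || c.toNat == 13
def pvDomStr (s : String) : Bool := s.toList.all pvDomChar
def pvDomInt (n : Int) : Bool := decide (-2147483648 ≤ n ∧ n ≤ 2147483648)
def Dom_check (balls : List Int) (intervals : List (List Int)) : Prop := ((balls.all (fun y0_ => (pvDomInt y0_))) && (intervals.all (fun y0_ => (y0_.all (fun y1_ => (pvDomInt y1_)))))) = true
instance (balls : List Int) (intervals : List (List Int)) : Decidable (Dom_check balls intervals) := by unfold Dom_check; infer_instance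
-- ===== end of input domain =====

-- B replaces A's quadratic double loop by sorting starts, ends and balls and sweeping
-- the sorted balls with two monotone pointers (per ball: #starts ≤ ball − #ends < ball).

-- ===== PORT A =====
def check (balls : List Int) (intervals : List (List Int)) : Int :=
  balls.foldl (fun res ball =>
    intervals.foldl (fun r inter =>
      match PySem.List.pyGet? inter 0 with
      | none => r
      | some lo =>
        if lo ≤ ball then
          match PySem.List.pyGet? inter 1 with
          | none => r
          | some hi => if ball ≤ hi then r + 1 else r
        else r) res) 0

-- ===== PORT B =====
-- pairs = [(it[0], it[1]) for it in intervals if it[0] <= it[1]]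
def pvPairs (intervals : List (List Int)) : List (Int × Int) :=
  intervals.filterMap (fun it =>
    match PySem.List.pyGet? it 0, PySem.List.pyGet? it 1 with
    | some s, some e => if s ≤ e then some (s, e) else none
    | _, _ => none)

-- the 'while i < len(xs) and <cmp>(xs[i], b): i += 1' loop, for comparison p
def pvAdvance (xs : List Int) (p : Int → Bool) (i : Nat) : Nat :=
  if h : i < xs.length then
    if p (xs[i]'h) then pvAdvance xs p (i + 1) else i
  else i
termination_by xs.length - i
decreasing_by omega

-- the body of the 'for b in sorted(balls)' loop: run both while loops, add i - j
def pvSweepStep (starts ends : List Int) (st : Int × Nat × Nat) (b : Int) : Int × Nat × Nat :=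
  let i := pvAdvance starts (fun t => decide (t ≤ b)) st.2.1
  let j := pvAdvance ends (fun t => decide (t < b)) st.2.2
  (st.1 + (i : Int) - (j : Int), i, j)

def check_alt (balls : List Int) (intervals : List (List Int)) : Int :=
  let pairs := pvPairs intervals
  let starts := PySem.List.sorted (pairs.map (·.1)) (fun x => x) false
  let ends := PySem.List.sorted (pairs.map (·.2)) (fun x => x) false
  ((PySem.List.sorted balls (fun x => x) false).foldl (pvSweepStep starts ends) (0, 0, 0)).1

-- ===== PRECONDITION & SPEC =====
-- Pre_ excludes inputs containing an interval of fewer than two elements, on which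
-- A raises IndexError for some ball values (and B always raises while building pairs).
def Pre_check (balls : List Int) (intervals : List (List Int)) : Prop :=
  ∀ inter ∈ intervals, 2 ≤ inter.length
instance (balls : List Int) (intervals : List (List Int)) : Decidable (Pre_check balls intervals) := by unfold Pre_check; infer_instance

def pvWitness_check : List Int × List (List Int) := ([1, 3, -2], [[0, 2], [2, 5]])

def Spec_check (balls : List Int) (intervals : List (List Int)) (out : Int) : Prop := out = check_alt balls intervals
instance (balls : List Int) (intervals : List (List Int)) (out : Int) : Decidable (Spec_check balls intervals out) := by unfold Spec_check; infer_instance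

-- ===== CLAIM (what is proved, stated in full; the proofs are below) =====
def Claim_equal_check : Prop := ∀ (balls : List Int) (intervals : List (List Int)), Dom_check balls intervals → Pre_check balls intervals → Spec_check balls intervals (check balls intervals)

-- ===== LEMMAS AND PROOFS =====

-- the per-ball count both programs compute
def pvCnt (b : Int) (pairs : List (Int × Int)) : Int :=
  (pairs.countP (fun q => decide (q.1 ≤ b) && decide (b ≤ q.2)) : Int)

lemma pvAddKey (r : Int) (n : Nat) : r + 1 + (n : Int) = r + ((n + 1 : Nat) : Int) := by
  omega

-- A's inner loop over the intervals adds pvCnt ball (pvPairs intervals)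
lemma checkInner_eq (ball : Int) (intervals : List (List Int))
    (hp : ∀ inter ∈ intervals, 2 ≤ inter.length) (r : Int) :
    intervals.foldl (fun r inter =>
      match PySem.List.pyGet? inter 0 with
      | none => r
      | some lo =>
        if lo ≤ ball then
          match PySem.List.pyGet? inter 1 with
          | none => r
          | some hi => if ball ≤ hi then r + 1 else r
        else r) r = r + pvCnt ball (pvPairs intervals) := by
  induction intervals generalizing r with
  | nil => simp [pvPairs, pvCnt]
  | cons it rest ih =>
    have hl := hp it (List.mem_cons_self ..)
    have h0 : PySem.List.pyGet? it 0 = some (it[0]'(by omega)) := by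
      simpa using PySem.List.pyGet?_ofNat it 0 (by omega)
    have h1 : PySem.List.pyGet? it 1 = some (it[1]'(by omega)) := by
      simpa using PySem.List.pyGet?_ofNat it 1 (by omega)
    have ih' := fun r => ih (fun i hi => hp i (List.mem_cons_of_mem _ hi)) r
    have hpp : pvPairs (it :: rest) =
        if (it[0]'(by omega)) ≤ (it[1]'(by omega)) then
          ((it[0]'(by omega)), (it[1]'(by omega))) :: pvPairs rest
        else pvPairs rest := by
      simp only [pvPairs, List.filterMap_cons, h0, h1]
      split_ifs <;> rfl
    simp only [List.foldl_cons, h0, h1, hpp, pvCnt]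
    by_cases ha : (it[0]'(by omega)) ≤ ball <;> by_cases hb : ball ≤ (it[1]'(by omega)) <;>
      by_cases hc : (it[0]'(by omega)) ≤ (it[1]'(by omega)) <;>
      simp only [ha, hb, hc, if_true, if_false, List.countP_cons, decide_true, decide_false,
        Bool.and_true, Bool.and_false, ite_true, ite_false, ih'] <;>
      first
        | omega
        | (simp only [pvCnt, List.countP_cons, ha, hb, hc, decide_true, decide_false,
              Bool.and_true, Bool.and_false, Bool.true_and, Bool.false_and,
              Bool.false_eq_true, if_true, if_false] <;>
           first
             | omega
             | exact pvAddKey r _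
             | simp)

-- A computes the sum of the per-ball counts
lemma check_eq_sum (balls : List Int) (intervals : List (List Int))
    (hp : ∀ inter ∈ intervals, 2 ≤ inter.length) :
    check balls intervals = (balls.map (fun b => pvCnt b (pvPairs intervals))).sum := by
  unfold check
  rw [PySem.List.foldl_congr_mem balls _
    (fun res ball => res + pvCnt ball (pvPairs intervals)) 0
    (by intro acc x _; exact checkInner_eq x intervals hp acc)]
  rw [PySem.List.foldl_add balls (fun b => pvCnt b (pvPairs intervals)) 0]
  simp

-- all pairs are valid (s ≤ e)
lemma pvPairs_valid (intervals : List (List Int)) :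
    ∀ q ∈ pvPairs intervals, q.1 ≤ q.2 := by
  intro q hq
  unfold pvPairs at hq
  rw [List.mem_filterMap] at hq
  obtain ⟨it, _, hf⟩ := hq
  revert hf
  cases PySem.List.pyGet? it 0 <;> cases PySem.List.pyGet? it 1 <;> simp
  rintro h rfl
  simpa using h

-- per-ball identity: #(s ≤ b) − #(e < b) = #(s ≤ b ≤ e), given s ≤ e throughout
lemma count_sub_count (b : Int) (pairs : List (Int × Int)) (hv : ∀ q ∈ pairs, q.1 ≤ q.2) :
    ((pairs.map (·.1)).countP (fun t => decide (t ≤ b)) : Int)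
      - ((pairs.map (·.2)).countP (fun t => decide (t < b)) : Int)
      = pvCnt b pairs := by
  induction pairs with
  | nil => simp [pvCnt]
  | cons q t ih =>
    have hq := hv q (List.mem_cons_self ..)
    have ih' := ih (fun r hr => hv r (List.mem_cons_of_mem _ hr))
    simp only [pvCnt, List.map_cons, List.countP_cons] at ih' ⊢
    by_cases h1 : q.1 ≤ b <;> by_cases h2 : b ≤ q.2 <;> by_cases h3 : q.2 < b <;>
      simp only [h1, h2, h3, decide_true, decide_false, Bool.and_true, Bool.and_false,
        Bool.false_eq_true, if_true, if_false, Bool.true_and, Bool.false_and] at ih' ⊢ <;>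
      omega

-- in a sorted list, once an element fails a downward-closed test, the rest of the list fails it
lemma countP_drop_eq_zero (xs : List Int) (p : Int → Bool)
    (hs : xs.Pairwise (· ≤ ·)) (hdc : ∀ x y : Int, x ≤ y → p y → p x)
    (i : Nat) (hi : i < xs.length) (hfail : ¬ p xs[i]) :
    (xs.drop i).countP p = 0 := by
  rw [List.countP_eq_zero]
  intro a ha
  obtain ⟨k, hk, hak⟩ := List.mem_iff_getElem.mp ha
  rw [List.length_drop] at hk
  rw [List.getElem_drop] at hak
  intro hpa
  apply hfail
  rcases Nat.eq_zero_or_pos k with rfl | hk0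
  · simpa using hak ▸ hpa
  · have hle : xs[i] ≤ xs[i + k]'(by omega) :=
      List.pairwise_iff_getElem.mp hs i (i + k) hi (by omega) (by omega)
    exact hdc _ _ hle (hak ▸ hpa)

lemma countP_take_eq (xs : List Int) (p : Int → Bool) (i : Nat) (hi : i ≤ xs.length)
    (hpre : ∀ k, (hk : k < i) → p (xs[k]'(lt_of_lt_of_le hk hi))) :
    (xs.take i).countP p = i := by
  have hall : ∀ a ∈ xs.take i, p a := by
    intro a ha
    obtain ⟨k, hk, hak⟩ := List.mem_iff_getElem.mp ha
    rw [List.length_take] at hk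
    rw [List.getElem_take] at hak
    exact hak ▸ hpre k (by omega)
  rw [List.countP_eq_length.mpr hall, List.length_take]
  omega

-- pvAdvance from a position whose prefix satisfies p reaches countP p
lemma pvAdvance_eq_countP (xs : List Int) (p : Int → Bool)
    (hs : xs.Pairwise (· ≤ ·)) (hdc : ∀ x y : Int, x ≤ y → p y → p x)
    (i : Nat) (hi : i ≤ xs.length)
    (hpre : ∀ k, (hk : k < i) → p (xs[k]'(lt_of_lt_of_le hk hi))) :
    pvAdvance xs p i = xs.countP p := by
  have H : ∀ n (i : Nat), xs.length - i = n → ∀ (hi : i ≤ xs.length),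
      (∀ k, (hk : k < i) → p (xs[k]'(lt_of_lt_of_le hk hi))) →
      pvAdvance xs p i = xs.countP p := by
    intro n
    induction n with
    | zero =>
      intro i hn hi hpre
      rw [pvAdvance, dif_neg (by omega)]
      have hall : ∀ a ∈ xs, p a := by
        intro a ha
        obtain ⟨k, hk, hak⟩ := List.mem_iff_getElem.mp ha
        exact hak ▸ hpre k (by omega)
      rw [List.countP_eq_length.mpr hall]
      omega
    | succ n ihn =>
      intro i hn hi hpre
      have hilt : i < xs.length := by omega
      rw [pvAdvance, dif_pos hilt]
      by_cases hp : p (xs[i]'hilt)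
      · rw [if_pos hp]
        apply ihn (i + 1) (by omega) (by omega)
        intro k hk
        rcases Nat.lt_succ_iff_lt_or_eq.mp hk with h | h
        · exact hpre k h
        · subst h; exact hp
      · rw [if_neg hp]
        have h1 := countP_take_eq xs p i (le_of_lt hilt) hpre
        have h2 := countP_drop_eq_zero xs p hs hdc i hilt hp
        have h3 : xs.countP p = (xs.take i).countP p + (xs.drop i).countP p := by
          rw [← List.countP_append, List.take_append_drop]
        omega
  exact H (xs.length - i) i rfl hi hpre

-- a position below countP p satisfies p (sorted, downward-closed)
lemma prefix_of_lt_countP (xs : List Int) (p : Int → Bool)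
    (hs : xs.Pairwise (· ≤ ·)) (hdc : ∀ x y : Int, x ≤ y → p y → p x)
    (k : Nat) (hk : k < xs.countP p) (hl : k < xs.length) :
    p xs[k] := by
  by_contra hpk
  have h2 := countP_drop_eq_zero xs p hs hdc k hl hpk
  have h3 : xs.countP p = (xs.take k).countP p + (xs.drop k).countP p := by
    rw [← List.countP_append, List.take_append_drop]
  have h4 : (xs.take k).countP p ≤ (xs.take k).length := List.countP_le_length
  rw [List.length_take] at h4
  omega

-- B's sweep over the sorted balls computes the sum of per-ball counts
lemma sweep_eq_sum (starts ends : List Int)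
    (hs : starts.Pairwise (· ≤ ·)) (he : ends.Pairwise (· ≤ ·)) :
    ∀ (bs : List Int), bs.Pairwise (· ≤ ·) →
    ∀ (res : Int) (i j : Nat) (hi : i ≤ starts.length) (hj : j ≤ ends.length),
    (∀ b ∈ bs, ∀ k, (hk : k < i) → starts[k]'(lt_of_lt_of_le hk hi) ≤ b) →
    (∀ b ∈ bs, ∀ k, (hk : k < j) → ends[k]'(lt_of_lt_of_le hk hj) < b) →
    (bs.foldl (pvSweepStep starts ends) (res, i, j)).1
      = res + (bs.map (fun b =>
          ((starts.countP (fun t => decide (t ≤ b)) : Int)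
            - (ends.countP (fun t => decide (t < b)) : Int)))).sum := by
  intro bs hbs
  induction bs with
  | nil => intro res i j hi hj _ _; simp
  | cons b rest ih =>
    intro res i j hi hj hpreS hpreE
    have hbrest : ∀ b' ∈ rest, b ≤ b' := (List.pairwise_cons.mp hbs).1
    have hrest := (List.pairwise_cons.mp hbs).2
    simp only [List.foldl_cons, pvSweepStep]
    have hi' : pvAdvance starts (fun t => decide (t ≤ b)) i = starts.countP (fun t => decide (t ≤ b)) := by
      apply pvAdvance_eq_countP starts _ hs (by intro x y hxy hy; simp at *; omega) i hi
      intro k hk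
      simpa using hpreS b (List.mem_cons_self ..) k hk
    have hj' : pvAdvance ends (fun t => decide (t < b)) j = ends.countP (fun t => decide (t < b)) := by
      apply pvAdvance_eq_countP ends _ he (by intro x y hxy hy; simp at *; omega) j hj
      intro k hk
      simpa using hpreE b (List.mem_cons_self ..) k hk
    have hi2 : starts.countP (fun t => decide (t ≤ b)) ≤ starts.length := List.countP_le_length
    have hj2 : ends.countP (fun t => decide (t < b)) ≤ ends.length := List.countP_le_length
    have step := ih hrest (res + (starts.countP (fun t => decide (t ≤ b)) : Int)
        - (ends.countP (fun t => decide (t < b)) : Int))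
      (starts.countP (fun t => decide (t ≤ b))) (ends.countP (fun t => decide (t < b))) hi2 hj2
      (by
        intro b' hb' k hk
        have hpk := prefix_of_lt_countP starts (fun t => decide (t ≤ b)) hs
          (by intro x y hxy hy; simp at *; omega) k hk (by omega)
        simp at hpk
        exact le_trans hpk (hbrest b' hb'))
      (by
        intro b' hb' k hk
        have hpk := prefix_of_lt_countP ends (fun t => decide (t < b)) he
          (by intro x y hxy hy; simp at *; omega) k hk (by omega)
        simp at hpk
        exact lt_of_lt_of_le hpk (hbrest b' hb'))
    simp only [hi', hj'] at step ⊢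
    rw [step]
    simp only [List.map_cons, List.sum_cons]
    ring

lemma check_alt_eq_sum (balls : List Int) (intervals : List (List Int)) :
    check_alt balls intervals = (balls.map (fun b => pvCnt b (pvPairs intervals))).sum := by
  unfold check_alt
  have hsP : (PySem.List.sorted ((pvPairs intervals).map (·.1)) (fun x => x) false).Pairwise (· ≤ ·) := by
    simpa using PySem.List.sorted_pairwise ((pvPairs intervals).map (·.1)) (fun x => x)
  have heP : (PySem.List.sorted ((pvPairs intervals).map (·.2)) (fun x => x) false).Pairwise (· ≤ ·) := by
    simpa using PySem.List.sorted_pairwise ((pvPairs intervals).map (·.2)) (fun x => x)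
  have hbP : (PySem.List.sorted balls (fun x => x) false).Pairwise (· ≤ ·) := by
    simpa using PySem.List.sorted_pairwise balls (fun x => x)
  rw [sweep_eq_sum _ _ hsP heP _ hbP 0 0 0 (by omega) (by omega)
    (by intro b _ k hk; omega) (by intro b _ k hk; omega)]
  have hcnt : ∀ b : Int,
      ((PySem.List.sorted ((pvPairs intervals).map (·.1)) (fun x => x) false).countP (fun t => decide (t ≤ b)) : Int)
        - ((PySem.List.sorted ((pvPairs intervals).map (·.2)) (fun x => x) false).countP (fun t => decide (t < b)) : Int)
      = pvCnt b (pvPairs intervals) := by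
    intro b
    rw [(PySem.List.sorted_perm ((pvPairs intervals).map (·.1)) (fun x => x) false).countP_eq,
        (PySem.List.sorted_perm ((pvPairs intervals).map (·.2)) (fun x => x) false).countP_eq]
    exact count_sub_count b (pvPairs intervals) (pvPairs_valid intervals)
  have hsum : ((PySem.List.sorted balls (fun x => x) false).map
        (fun b => ((PySem.List.sorted ((pvPairs intervals).map (·.1)) (fun x => x) false).countP (fun t => decide (t ≤ b)) : Int)
          - ((PySem.List.sorted ((pvPairs intervals).map (·.2)) (fun x => x) false).countP (fun t => decide (t < b)) : Int))).sum
      = ((PySem.List.sorted balls (fun x => x) false).map (fun b => pvCnt b (pvPairs intervals))).sum := by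
    apply congrArg List.sum
    exact List.map_congr_left (fun b _ => hcnt b)
  rw [hsum, ((PySem.List.sorted_perm balls (fun x => x) false).map (fun b => pvCnt b (pvPairs intervals))).sum_eq]
  simp

-- ===== VERDICT (by name: the statement is the Claim_ definition above) =====
theorem check_spec : Claim_equal_check := by
  intro balls intervals _ hpre
  unfold Spec_check
  rw [check_eq_sum balls intervals hpre, check_alt_eq_sum]
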